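-- pv_equiv track=rewrite | github.com/gcasti256/ml-eval-toolkit | src/ml_eval/metrics/rouge.py | _ngram_overlap
-- ===== SOURCE A (Python) =====
-- def _ngram_overlap(
--     reference_tokens: list[str], hypothesis_tokens: list[str], n: int
-- ) -> tuple[int, int, int]:
--     """Count n-gram overlap between reference and hypothesis.
--
--     Returns (overlap_count, reference_ngram_count, hypothesis_ngram_count).
--     """
--     ref_ngrams: dict[tuple[str, ...], int] = {}
--     for i in range(len(reference_tokens) - n + 1):
--         ng = tuple(reference_tokens[i : i + n])
--         ref_ngrams[ng] = ref_ngrams.get(ng, 0) + 1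
--
--     hyp_ngrams: dict[tuple[str, ...], int] = {}
--     for i in range(len(hypothesis_tokens) - n + 1):
--         ng = tuple(hypothesis_tokens[i : i + n])
--         hyp_ngrams[ng] = hyp_ngrams.get(ng, 0) + 1
--
--     overlap = 0
--     for ng, count in hyp_ngrams.items():
--         overlap += min(count, ref_ngrams.get(ng, 0))
--
--     ref_count = sum(ref_ngrams.values())
--     hyp_count = sum(hyp_ngrams.values())
--     return overlap, ref_count, hyp_count
-- ===== SOURCE B (Python) =====
-- def _ngram_overlap(
--     reference_tokens: list[str], hypothesis_tokens: list[str], n: int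
-- ) -> tuple[int, int, int]:
--     """Count n-gram overlap between reference and hypothesis.
--
--     Returns (overlap_count, reference_ngram_count, hypothesis_ngram_count).
--     """
--     ref_ngrams: dict[tuple[str, ...], int] = {}
--     for i in range(len(reference_tokens) - n + 1):
--         ng = tuple(reference_tokens[i : i + n])
--         ref_ngrams[ng] = ref_ngrams.get(ng, 0) + 1
--     ref_count = sum(ref_ngrams.values())
--
--     remaining = dict(ref_ngrams)
--     overlap = 0
--     hyp_count = 0
--     for i in range(len(hypothesis_tokens) - n + 1):
--         ng = tuple(hypothesis_tokens[i : i + n])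
--         hyp_count += 1
--         if remaining.get(ng, 0) > 0:
--             overlap += 1
--             remaining[ng] -= 1
--     return overlap, ref_count, hyp_count
-- ===== Notes on version B (the rewrite author's own statement) =====
-- stated objective: simpler
-- what changed: B drops A's second counting dict and its separate min-accumulation loop: it builds only the reference n-gram counts, then makes one clipped-matching pass over the hypothesis n-grams, decrementing a working copy of the reference counts and counting hypothesis n-grams on the fly.
import Mathlib
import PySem

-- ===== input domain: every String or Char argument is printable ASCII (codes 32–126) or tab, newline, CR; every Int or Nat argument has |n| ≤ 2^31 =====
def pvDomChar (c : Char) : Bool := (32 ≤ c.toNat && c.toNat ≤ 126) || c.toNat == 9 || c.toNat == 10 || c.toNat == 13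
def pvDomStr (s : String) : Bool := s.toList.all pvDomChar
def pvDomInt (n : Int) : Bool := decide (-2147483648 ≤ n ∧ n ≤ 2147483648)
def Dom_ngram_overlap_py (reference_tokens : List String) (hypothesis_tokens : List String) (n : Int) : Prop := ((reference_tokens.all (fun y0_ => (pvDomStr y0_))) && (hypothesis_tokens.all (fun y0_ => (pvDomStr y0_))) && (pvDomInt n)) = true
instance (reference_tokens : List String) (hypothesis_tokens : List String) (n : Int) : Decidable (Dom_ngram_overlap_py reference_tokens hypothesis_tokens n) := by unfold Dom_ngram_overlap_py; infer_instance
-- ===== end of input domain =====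

-- ===== PORT A =====
-- B replaces A's second counting dict and min-loop by a single clipped-matching pass over the
-- hypothesis n-grams (same return value; objective: simpler one-pass decomposition, not speed).
def ngram_overlap_py (reference_tokens : List String) (hypothesis_tokens : List String) (n : Int) : Int × Int × Int :=
  let ref_ngrams : PySem.Dict (List String) Int :=
    (PySem.List.pyRange 0 ((reference_tokens.length : Int) - n + 1) 1).foldl
      (fun d i =>
        let ng := PySem.List.slice reference_tokens (some i) (some (i + n))
        d.insert ng (d.getD ng 0 + 1)) PySem.Dict.empty
  let hyp_ngrams : PySem.Dict (List String) Int :=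
    (PySem.List.pyRange 0 ((hypothesis_tokens.length : Int) - n + 1) 1).foldl
      (fun d i =>
        let ng := PySem.List.slice hypothesis_tokens (some i) (some (i + n))
        d.insert ng (d.getD ng 0 + 1)) PySem.Dict.empty
  let overlap : Int :=
    hyp_ngrams.items.foldl (fun acc p => acc + min p.2 (ref_ngrams.getD p.1 0)) 0
  let ref_count := ref_ngrams.values.sum
  let hyp_count := hyp_ngrams.values.sum
  (overlap, ref_count, hyp_count)

-- ===== PORT B =====
-- one iteration of B's clipped-matching loop body (state = (remaining, overlap, hyp_count))
def ngramClipStep (st : PySem.Dict (List String) Int × Int × Int) (ng : List String) :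
    PySem.Dict (List String) Int × Int × Int :=
  let hc := st.2.2 + 1
  if st.1.getD ng 0 > 0 then (st.1.insert ng (st.1.getD ng 0 - 1), st.2.1 + 1, hc)
  else (st.1, st.2.1, hc)

def ngram_overlap_py_alt (reference_tokens : List String) (hypothesis_tokens : List String) (n : Int) : Int × Int × Int :=
  let ref_ngrams : PySem.Dict (List String) Int :=
    (PySem.List.pyRange 0 ((reference_tokens.length : Int) - n + 1) 1).foldl
      (fun d i =>
        let ng := PySem.List.slice reference_tokens (some i) (some (i + n))
        d.insert ng (d.getD ng 0 + 1)) PySem.Dict.empty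
  let ref_count := ref_ngrams.values.sum
  let fin :=
    (PySem.List.pyRange 0 ((hypothesis_tokens.length : Int) - n + 1) 1).foldl
      (fun st i => ngramClipStep st (PySem.List.slice hypothesis_tokens (some i) (some (i + n))))
      (ref_ngrams, 0, 0)
  (fin.2.1, ref_count, fin.2.2)

-- ===== PRECONDITION & SPEC =====
def Spec_ngram_overlap_py (reference_tokens : List String) (hypothesis_tokens : List String) (n : Int) (out : Int × Int × Int) : Prop := out = ngram_overlap_py_alt reference_tokens hypothesis_tokens n
instance (reference_tokens : List String) (hypothesis_tokens : List String) (n : Int) (out : Int × Int × Int) : Decidable (Spec_ngram_overlap_py reference_tokens hypothesis_tokens n out) := by unfold Spec_ngram_overlap_py; infer_instance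

-- ===== CLAIM (what is proved, stated in full; the proofs are below) =====
def Claim_equal_ngram_overlap_py : Prop := ∀ (reference_tokens : List String) (hypothesis_tokens : List String) (n : Int), Dom_ngram_overlap_py reference_tokens hypothesis_tokens n → Spec_ngram_overlap_py reference_tokens hypothesis_tokens n (ngram_overlap_py reference_tokens hypothesis_tokens n)

-- ===== LEMMAS AND PROOFS =====

-- the counting loop over the index range is Counter of the mapped n-gram list
lemma fold_slice_counter (tokens : List String) (n len : Int) :
    (PySem.List.pyRange 0 len 1).foldl
      (fun d i =>
        let ng := PySem.List.slice tokens (some i) (some (i + n))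
        d.insert ng (d.getD ng 0 + 1)) PySem.Dict.empty
    = PySem.Dict.counter
        ((PySem.List.pyRange 0 len 1).map (fun i => PySem.List.slice tokens (some i) (some (i + n)))) := by
  rw [← PySem.Dict.foldl_insert_getD_add_one_eq_counter, List.foldl_map]

-- B's loop over the index range is the clip fold over the mapped n-gram list
lemma fold_slice_clip (tokens : List String) (n len : Int)
    (st : PySem.Dict (List String) Int × Int × Int) :
    (PySem.List.pyRange 0 len 1).foldl
      (fun st i => ngramClipStep st (PySem.List.slice tokens (some i) (some (i + n)))) st
    = ((PySem.List.pyRange 0 len 1).map (fun i => PySem.List.slice tokens (some i) (some (i + n)))).foldl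
        ngramClipStep st := (List.foldl_map).symm

lemma clip_hyp_count (xs : List (List String)) :
    ∀ (d : PySem.Dict (List String) Int) (ov hc : Int),
      (xs.foldl ngramClipStep (d, ov, hc)).2.2 = hc + (xs.length : Int) := by
  induction xs with
  | nil => intro d ov hc; simp
  | cons x t ih =>
    intro d ov hc
    rw [List.foldl_cons]
    by_cases hpos : d.getD x 0 > 0 <;>
      simp only [ngramClipStep, hpos, if_true, if_false, List.length_cons] <;>
      rw [ih] <;> push_cast <;> ring

lemma clip_overlap (xs : List (List String)) :
    ∀ (d : PySem.Dict (List String) Int) (ov hc : Int),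
      (xs.foldl ngramClipStep (d, ov, hc)).2.1
        = ov + ∑ k ∈ xs.toFinset, min ((xs.count k : Int)) (max (d.getD k 0) 0) := by
  induction xs with
  | nil => intro d ov hc; simp
  | cons x t ih =>
    intro d ov hc
    rw [List.foldl_cons]
    by_cases hpos : d.getD x 0 > 0
    · have hstep : ngramClipStep (d, ov, hc) x
          = (d.insert x (d.getD x 0 - 1), ov + 1, hc + 1) := by
        simp [ngramClipStep, hpos]
      rw [hstep, ih]
      by_cases hx : x ∈ t
      · have hset : (x :: t).toFinset = t.toFinset := by
          simp [List.toFinset_cons, hx]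
        have hx' : x ∈ t.toFinset := List.mem_toFinset.mpr hx
        rw [hset, ← Finset.add_sum_erase _ _ hx', ← Finset.add_sum_erase _ _ hx']
        have hcong : ∑ k ∈ t.toFinset.erase x, min ((x :: t).count k : Int) (max (d.getD k 0) 0)
            = ∑ k ∈ t.toFinset.erase x,
                min ((t.count k : Int)) (max ((d.insert x (d.getD x 0 - 1)).getD k 0) 0) := by
          apply Finset.sum_congr rfl
          intro k hk
          have hne : k ≠ x := Finset.ne_of_mem_erase hk
          rw [List.count_cons_of_ne (Ne.symm hne), PySem.Dict.getD_insert_of_ne _ _ _ hne]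
        rw [List.count_cons_self, PySem.Dict.getD_insert_self, hcong]
        omega
      · have hset : (x :: t).toFinset = insert x t.toFinset := List.toFinset_cons
        have hx' : x ∉ t.toFinset := fun hmem => hx (List.mem_toFinset.mp hmem)
        rw [hset, Finset.sum_insert hx']
        have hcong : ∑ k ∈ t.toFinset, min ((x :: t).count k : Int) (max (d.getD k 0) 0)
            = ∑ k ∈ t.toFinset,
                min ((t.count k : Int)) (max ((d.insert x (d.getD x 0 - 1)).getD k 0) 0) := by
          apply Finset.sum_congr rfl
          intro k hk
          have hne : k ≠ x := fun he => hx' (he ▸ hk)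
          rw [List.count_cons_of_ne (Ne.symm hne), PySem.Dict.getD_insert_of_ne _ _ _ hne]
        rw [List.count_cons_self, List.count_eq_zero_of_not_mem hx, hcong]
        omega
    · have hstep : ngramClipStep (d, ov, hc) x = (d, ov, hc + 1) := by
        simp [ngramClipStep, hpos]
      rw [hstep, ih]
      by_cases hx : x ∈ t
      · have hset : (x :: t).toFinset = t.toFinset := by
          simp [List.toFinset_cons, hx]
        rw [hset]
        congr 1
        apply Finset.sum_congr rfl
        intro k hk
        by_cases hkx : k = x
        · subst hkx; rw [List.count_cons_self]; omega
        · rw [List.count_cons_of_ne (Ne.symm hkx)]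
      · have hx' : x ∉ t.toFinset := fun hmem => hx (List.mem_toFinset.mp hmem)
        rw [List.toFinset_cons, Finset.sum_insert hx']
        have hterm : min (((x :: t).count x : Int)) (max (d.getD x 0) 0) = 0 := by
          rw [List.count_cons_self]; omega
        rw [hterm]
        have hcong : ∑ k ∈ t.toFinset, min ((x :: t).count k : Int) (max (d.getD k 0) 0)
            = ∑ k ∈ t.toFinset, min ((t.count k : Int)) (max (d.getD k 0) 0) := by
          apply Finset.sum_congr rfl
          intro k hk
          have hne : k ≠ x := fun he => hx' (he ▸ hk)
          rw [List.count_cons_of_ne (Ne.symm hne)]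
        rw [hcong]; ring

lemma toFinset_ofList (xs : List (List String)) :
    (PySem.Set.ofList xs).toFinset = xs.toFinset := by
  apply Finset.ext
  intro k
  simp [PySem.Set.mem_ofList]

-- A's min-loop over the hypothesis Counter's items, as a Finset sum
lemma overlap_A_sum (H : List (List String)) (R : PySem.Dict (List String) Int) :
    (PySem.Dict.counter H).items.foldl (fun acc p => acc + min p.2 (R.getD p.1 0)) 0
    = ∑ k ∈ H.toFinset, min ((H.count k : Int)) (R.getD k 0) := by
  rw [PySem.Dict.items_counter, List.foldl_map, PySem.List.foldl_add, zero_add,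
    ← List.sum_toFinset _ (PySem.Set.nodup_ofList H), toFinset_ofList]

-- the values of Counter(H) sum to |H|
lemma values_counter_sum (H : List (List String)) :
    (PySem.Dict.counter H).values.sum = (H.length : Int) := by
  have : (PySem.Dict.counter H).values
      = (PySem.Set.ofList H).map (fun k => ((H.count k : Int))) := by
    simp [PySem.Dict.values, PySem.Dict.items_counter, List.map_map, Function.comp]
  rw [this, ← List.sum_toFinset _ (PySem.Set.nodup_ofList H), toFinset_ofList, ← Nat.cast_sum]
  have h := congrArg (fun m : Nat => (m : Int)) (List.sum_toFinset_count_eq_length H)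
  convert h using 4
  exact lawful_beq_subsingleton _ _

-- ===== VERDICT (by name: the statement is the Claim_ definition above) =====
theorem ngram_overlap_py_spec : Claim_equal_ngram_overlap_py := by
  intro reference_tokens hypothesis_tokens n _
  unfold Spec_ngram_overlap_py ngram_overlap_py ngram_overlap_py_alt
  simp only [fold_slice_counter, fold_slice_clip]
  set H := (PySem.List.pyRange 0 ((hypothesis_tokens.length : Int) - n + 1) 1).map
      (fun i => PySem.List.slice hypothesis_tokens (some i) (some (i + n))) with hH
  set R := (PySem.List.pyRange 0 ((reference_tokens.length : Int) - n + 1) 1).map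
      (fun i => PySem.List.slice reference_tokens (some i) (some (i + n))) with hR
  refine Prod.ext ?_ (Prod.ext rfl ?_)
  · show (PySem.Dict.counter H).items.foldl
        (fun acc p => acc + min p.2 ((PySem.Dict.counter R).getD p.1 0)) 0
      = (H.foldl ngramClipStep (PySem.Dict.counter R, 0, 0)).2.1
    rw [overlap_A_sum, clip_overlap, zero_add]
    apply Finset.sum_congr rfl
    intro k _
    rw [PySem.Dict.getD_counter]
    rw [max_eq_left (Int.natCast_nonneg _)]
  · show (PySem.Dict.counter H).values.sum
      = (H.foldl ngramClipStep (PySem.Dict.counter R, 0, 0)).2.2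
    rw [values_counter_sum, clip_hyp_count, zero_add]
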